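-- pv_equiv track=rewrite | github.com/yimingnzhao/TAPER-Results | Scripts_Error_Simulation/generateErrorModel_RandomErrLen.py | getLastCharInRange
-- ===== SOURCE A (Python) =====
-- def getLastCharInRange( sequence, length ):
--     char_count = 0;
--     current_index = len(sequence) - 2;
--     while char_count < length:
--         # Checks if current_index has become negative and exits program if true
--         if current_index < 0:
--             return 0
--         current_char = sequence[current_index];
--         # Only increments char_count if the char is not a gap
--         if not current_char == "-":
--             char_count += 1;
--         current_index -= 1;
--     return current_index + 1;
-- ===== SOURCE B (Python) =====
-- def getLastCharInRange(sequence, length):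
--     if length <= 0:
--         return len(sequence) - 1
--     idx = [i for i in range(len(sequence) - 1) if sequence[i] != "-"]
--     if len(idx) >= length:
--         return idx[-length]
--     return 0
-- ===== Notes on version B (the rewrite author's own statement) =====
-- stated objective: alternative
-- what changed: Replaces A's backward while-loop that counts non-gap characters with a single forward pass building the list of non-gap positions (excluding the final character) and one direct selection of the length-th entry from its end.
import Mathlib
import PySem

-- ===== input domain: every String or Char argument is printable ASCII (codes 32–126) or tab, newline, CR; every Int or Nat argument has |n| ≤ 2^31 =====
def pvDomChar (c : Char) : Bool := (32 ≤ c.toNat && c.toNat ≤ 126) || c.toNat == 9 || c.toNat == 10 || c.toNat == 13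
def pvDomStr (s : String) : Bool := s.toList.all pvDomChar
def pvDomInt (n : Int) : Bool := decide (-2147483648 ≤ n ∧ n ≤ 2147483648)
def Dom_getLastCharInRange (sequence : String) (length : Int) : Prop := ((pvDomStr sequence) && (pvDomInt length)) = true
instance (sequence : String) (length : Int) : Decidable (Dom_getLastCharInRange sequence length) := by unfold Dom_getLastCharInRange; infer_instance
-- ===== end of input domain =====

-- B replaces A's backward counting scan by one forward pass collecting non-gap
-- positions and a single selection from that table (objective: alternative).

-- ===== PORT A =====
-- A's while loop: char_count/current_index state, scanning backward from len-2.
-- sequence[current_index] is always in range here (0 ≤ current_index ≤ len-2),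
-- so the .getD default is never used.
def getLastCharInRange_loop (cs : List Char) (length charCount currentIndex : Int) : Int :=
  if charCount < length then
    if currentIndex < 0 then 0
    else
      let currentChar := (PySem.List.pyGet? cs currentIndex).getD ' '
      getLastCharInRange_loop cs length
        (if ¬ (currentChar = '-') then charCount + 1 else charCount)
        (currentIndex - 1)
  else currentIndex + 1
termination_by (currentIndex + 1).toNat
decreasing_by omega

def getLastCharInRange (sequence : String) (length : Int) : Int :=
  getLastCharInRange_loop sequence.toList length 0 (PySem.Str.len sequence - 2)

-- ===== PORT B =====
-- idx = [i for i in range(len(sequence)-1) if sequence[i] != "-"]; then select.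
def getLastCharInRange_alt (sequence : String) (length : Int) : Int :=
  if length ≤ 0 then PySem.Str.len sequence - 1
  else
    let idx := (PySem.List.pyRange 0 (PySem.Str.len sequence - 1) 1).filter
      (fun j => ((PySem.List.pyGet? sequence.toList j).getD '-') ≠ '-')
    if (idx.length : Int) ≥ length then (PySem.List.pyGet? idx (-length)).getD 0
    else 0

-- ===== PRECONDITION & SPEC =====
def Spec_getLastCharInRange (sequence : String) (length : Int) (out : Int) : Prop := out = getLastCharInRange_alt sequence length
instance (sequence : String) (length : Int) (out : Int) : Decidable (Spec_getLastCharInRange sequence length out) := by unfold Spec_getLastCharInRange; infer_instance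

-- ===== CLAIM (what is proved, stated in full; the proofs are below) =====
def Claim_equal_getLastCharInRange : Prop := ∀ (sequence : String) (length : Int), Dom_getLastCharInRange sequence length → Spec_getLastCharInRange sequence length (getLastCharInRange sequence length)

-- ===== LEMMAS AND PROOFS =====

-- non-gap positions among indices 0..i of cs (same predicate as B's filter)
def gapsUpTo (cs : List Char) (i : Int) : List Int :=
  (PySem.List.pyRange 0 (i + 1) 1).filter
    (fun j => ((PySem.List.pyGet? cs j).getD '-') ≠ '-')

-- the k-th element of idx counting from the end (k > 0), 0 if too short
def selFromEnd (idx : List Int) (k : Int) : Int :=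
  if (idx.length : Int) ≥ k then idx.getD (idx.length - k.toNat) 0 else 0

lemma gapsUpTo_succ (cs : List Char) (i : Int) (hi : 0 ≤ i) :
    gapsUpTo cs i = gapsUpTo cs (i - 1) ++
      (if ((PySem.List.pyGet? cs i).getD '-') ≠ '-' then [i] else []) := by
  unfold gapsUpTo
  have h : (i - 1) + 1 = i := by omega
  rw [h]
  have : PySem.List.pyRange 0 (i + 1) 1 = PySem.List.pyRange 0 i 1 ++ [i] :=
    PySem.List.pyRange_one_succ_right hi
  rw [this, List.filter_append]
  simp only [List.filter]
  split <;> simp_all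

lemma sel_append (P : List Int) (x k : Int) (hk : 1 < k) :
    selFromEnd (P ++ [x]) k = selFromEnd P (k - 1) := by
  unfold selFromEnd
  simp only [List.length_append, List.length_cons, List.length_nil]
  split_ifs with h1 h2 h2
  · have hsh : P.length + 1 - k.toNat = P.length - (k - 1).toNat := by omega
    rw [hsh]
    exact List.getD_append _ _ _ _ (by omega)
  · exfalso; push_cast at h1 h2; omega
  · exfalso; push_cast at h1 h2; omega
  · rfl

lemma sel_append_one (P : List Int) (x : Int) : selFromEnd (P ++ [x]) 1 = x := by
  unfold selFromEnd
  simp only [List.length_append, List.length_cons, List.length_nil]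
  rw [if_pos (by push_cast; omega)]
  have hsh : P.length + 1 - (1 : Int).toNat = P.length := by omega
  rw [hsh]
  simp

lemma loop_eq (cs : List Char) (L : Int) : ∀ (m : Nat) (i c : Int),
    (i + 1).toNat ≤ m → i < (cs.length : Int) →
    getLastCharInRange_loop cs L c i =
      if c < L then selFromEnd (gapsUpTo cs i) (L - c) else i + 1 := by
  intro m
  induction m with
  | zero =>
    intro i c hm _
    have hineg : i < 0 := by omega
    by_cases hc : c < L
    · rw [getLastCharInRange_loop, if_pos hc, if_pos hineg, if_pos hc]
      have hg : gapsUpTo cs i = [] := by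
        unfold gapsUpTo
        rw [PySem.List.pyRange_one_eq_nil (by omega)]
        rfl
      rw [hg]
      unfold selFromEnd
      simp only [List.length_nil]
      rw [if_neg (by push_cast; omega)]
    · rw [getLastCharInRange_loop, if_neg hc, if_neg hc]
  | succ m ih =>
    intro i c hm hlen
    by_cases hc : c < L
    · by_cases hineg : i < 0
      · rw [getLastCharInRange_loop, if_pos hc, if_pos hineg, if_pos hc]
        have hg : gapsUpTo cs i = [] := by
          unfold gapsUpTo
          rw [PySem.List.pyRange_one_eq_nil (by omega)]
          rfl
        rw [hg]
        unfold selFromEnd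
        simp only [List.length_nil]
        rw [if_neg (by push_cast; omega)]
      · have h0 : 0 ≤ i := by omega
        have hget : PySem.List.pyGet? cs i = some cs[i.toNat] :=
          PySem.List.pyGet?_eq_some_getElem cs h0 hlen
        rw [getLastCharInRange_loop, if_pos hc, if_neg hineg]
        simp only [hget, Option.getD_some]
        by_cases hch : cs[i.toNat] = '-'
        · -- gap: count and non-gap table both unchanged
          rw [if_neg (not_not_intro hch)]
          rw [ih (i - 1) c (by omega) (by omega), if_pos hc, if_pos hc]
          rw [gapsUpTo_succ cs i h0, hget]
          simp [hch]
        · -- non-gap char at index i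
          rw [if_pos hch]
          rw [ih (i - 1) (c + 1) (by omega) (by omega), if_pos hc]
          rw [gapsUpTo_succ cs i h0, hget]
          simp only [Option.getD_some]
          rw [if_pos (show cs[i.toNat] ≠ '-' from hch)]
          by_cases hc1 : c + 1 < L
          · rw [if_pos hc1, sel_append _ _ _ (by omega)]
            have hr : L - c - 1 = L - (c + 1) := by ring
            rw [hr]
          · -- L = c + 1 : loop stops, answer is index i, the last table entry
            rw [if_neg hc1, show L - c = 1 by omega, sel_append_one]
            ring
    · rw [getLastCharInRange_loop, if_neg hc, if_neg hc]

-- ===== VERDICT (by name: the statement is the Claim_ definition above) =====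
theorem getLastCharInRange_spec : Claim_equal_getLastCharInRange := by
  unfold Claim_equal_getLastCharInRange
  intro sequence length _
  unfold Spec_getLastCharInRange getLastCharInRange getLastCharInRange_alt
  set cs := sequence.toList with hcs
  have hlen : PySem.Str.len sequence = (cs.length : Int) := by
    simp [PySem.Str.len_eq, hcs]
  rw [hlen]
  by_cases hL : length ≤ 0
  · rw [if_pos hL]
    rw [getLastCharInRange_loop]
    rw [if_neg (by omega)]
    ring
  · rw [if_neg hL]
    have hLpos : 0 < length := by omega
    have hmain := loop_eq cs length ((cs.length : Int) - 1).toNat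
      ((cs.length : Int) - 2) 0 (by omega) (by omega)
    rw [hmain, if_pos (show (0 : Int) < length by omega)]
    have harr : gapsUpTo cs ((cs.length : Int) - 2)
        = (PySem.List.pyRange 0 ((cs.length : Int) - 1) 1).filter
            (fun j => ((PySem.List.pyGet? cs j).getD '-') ≠ '-') := by
      unfold gapsUpTo
      rw [show ((cs.length : Int) - 2) + 1 = (cs.length : Int) - 1 by ring]
    rw [harr]
    set idx := (PySem.List.pyRange 0 ((cs.length : Int) - 1) 1).filter
      (fun j => ((PySem.List.pyGet? cs j).getD '-') ≠ '-') with hidx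
    unfold selFromEnd
    rw [show length - 0 = length by ring]
    by_cases hge : ((idx.length : Int)) ≥ length
    · rw [if_pos hge, if_pos hge]
      have h1 : PySem.List.pyGet? idx (-length) = idx[idx.length - length.toNat]? := by
        have h2 := PySem.List.pyGet?_neg_natCast idx length.toNat (by omega) (by omega)
        rwa [Int.toNat_of_nonneg (by omega)] at h2
      rw [h1, List.getElem?_eq_getElem (by omega)]
      simp [List.getD_eq_getElem?_getD,
        List.getElem?_eq_getElem (show idx.length - length.toNat < idx.length by omega)]
    · rw [if_neg hge, if_neg hge]
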